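-- pv_equiv track=rewrite | github.com/jonathanlloyd/advent-of-code-2019 | day-04/part_1.py | always_increasing
-- ===== SOURCE A (Python) =====
-- def always_increasing(password):
--     password_str = str(password)
--     for i in range(1, len(password_str)):
--         prev_char = password_str[i-1]
--         current_char = password_str[i]
--         if prev_char > current_char:
--             return False
--     return True
-- ===== SOURCE B (Python) =====
-- def always_increasing(password):
--     s = str(password)
--     return s == ''.join(sorted(s))
-- ===== Notes on version B (the rewrite author's own statement) =====
-- stated objective: idiomatic
-- what changed: Replaces the explicit index loop over adjacent digit pairs by sorting the character string and comparing it to the original (non-decreasing iff already sorted).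
import Mathlib
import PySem

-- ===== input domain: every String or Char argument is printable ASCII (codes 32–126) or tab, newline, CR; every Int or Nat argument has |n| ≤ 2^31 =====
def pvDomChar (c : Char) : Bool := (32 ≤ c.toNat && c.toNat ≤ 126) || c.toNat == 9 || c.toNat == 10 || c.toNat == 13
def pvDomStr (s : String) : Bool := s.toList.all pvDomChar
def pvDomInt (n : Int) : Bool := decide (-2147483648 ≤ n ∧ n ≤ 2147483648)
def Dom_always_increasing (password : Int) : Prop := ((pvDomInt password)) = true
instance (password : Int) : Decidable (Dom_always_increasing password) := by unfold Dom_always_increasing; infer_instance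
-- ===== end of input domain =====

-- ===== PORT A =====
-- A walks the string with an index loop, comparing each adjacent pair and returning early.
-- chkA transliterates the loop 'for i in range(1, len(s)): if s[i-1] > s[i]: return False'.
def chkA : List Char → Bool
  | [] => true
  | [_] => true
  | a :: b :: t => if a > b then false else chkA (b :: t)

def always_increasing (password : Int) : Bool :=
  chkA (PySem.Int.toStr password).toList

-- ===== PORT B =====
-- B: s = str(password); return s == ''.join(sorted(s))
def always_increasing_alt (password : Int) : Bool :=
  let l := (PySem.Int.toStr password).toList
  l == PySem.List.sorted l (fun x => x) false

-- ===== PRECONDITION & SPEC =====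
def Spec_always_increasing (password : Int) (out : Bool) : Prop := out = always_increasing_alt password
instance (password : Int) (out : Bool) : Decidable (Spec_always_increasing password out) := by unfold Spec_always_increasing; infer_instance

-- ===== CLAIM (what is proved, stated in full; the proofs are below) =====
def Claim_equal_always_increasing : Prop := ∀ (password : Int), Dom_always_increasing password → Spec_always_increasing password (always_increasing password)

-- ===== LEMMAS AND PROOFS =====
theorem chkA_iff_pairwise (l : List Char) : chkA l = true ↔ l.Pairwise (· ≤ ·) := by
  induction l with
  | nil => simp [chkA]
  | cons a t ih =>
    cases t with
    | nil => simp [chkA]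
    | cons b u =>
      simp only [chkA, List.pairwise_cons] at *
      constructor
      · intro h
        by_cases hab : a > b
        · simp [hab] at h
        · have h2 := ih.mp (by simpa [hab] using h)
          refine ⟨?_, h2⟩
          intro x hx
          rcases List.mem_cons.mp hx with rfl | hxu
          · exact le_of_not_gt hab
          · exact le_trans (le_of_not_gt hab) (h2.1 x hxu)
      · rintro ⟨h1, h2⟩
        have hb : a ≤ b := h1 b (List.mem_cons_self ..)
        have : ¬ a > b := not_lt_of_ge hb
        simp [this, ih.mpr h2]

theorem chkA_eq_sorted (l : List Char) :
    chkA l = (l == PySem.List.sorted l (fun x => x) false) := by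
  by_cases h : l.Pairwise (· ≤ ·)
  · rw [(chkA_iff_pairwise l).mpr h, PySem.List.sorted_eq_self_of_pairwise _ _ h]
    simp
  · have h1 : chkA l = false := by
      cases hc : chkA l
      · rfl
      · exact absurd ((chkA_iff_pairwise l).mp hc) h
    rw [h1]
    have : l ≠ PySem.List.sorted l (fun x => x) false := by
      intro he
      exact h (by rw [he]; exact PySem.List.sorted_pairwise _ _)
    simp [this]

-- ===== VERDICT (by name: the statement is the Claim_ definition above) =====
theorem always_increasing_spec : Claim_equal_always_increasing := by
  intro password _
  unfold Spec_always_increasing always_increasing always_increasing_alt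
  exact chkA_eq_sorted _
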